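-- pv_equiv track=rewrite | github.com/aravindhan08-AH08/Python_daily_task | Daily_task_folder/2026-02-25.py | unique_usernames
-- ===== SOURCE A (Python) =====
-- def unique_usernames(arr):
--     count = {}
--     result = []
--
--     for name in arr:
--         if name not in count:
--             count[name] = 0
--             result.append("Verified")
--         else:
--             count[name] += 1
--             result.append(name + str(count[name]))
--
--     return result
-- ===== SOURCE B (Python) =====
-- def unique_usernames(arr):
--     # group-by-name (one pass), then scatter-write each name's label sequence by position
--     arr = list(arr)
--     out = [None] * len(arr)
--     positions = {}
--     for i, name in enumerate(arr):
--         positions.setdefault(name, []).append(i)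
--     for name, idxs in positions.items():
--         for k, i in enumerate(idxs):
--             out[i] = "Verified" if k == 0 else name + str(k)
--     return out
-- ===== Notes on version B (the rewrite author's own statement) =====
-- stated objective: alternative
-- what changed: Replaces A's single pass with a running per-name counter and sequential appends by a group-by-then-scatter scheme: one pass groups each name's occurrence positions into a dict of lists, then each group's whole label sequence (Verified, name1, name2, ...) is written into a preallocated output by position.
import Mathlib
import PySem

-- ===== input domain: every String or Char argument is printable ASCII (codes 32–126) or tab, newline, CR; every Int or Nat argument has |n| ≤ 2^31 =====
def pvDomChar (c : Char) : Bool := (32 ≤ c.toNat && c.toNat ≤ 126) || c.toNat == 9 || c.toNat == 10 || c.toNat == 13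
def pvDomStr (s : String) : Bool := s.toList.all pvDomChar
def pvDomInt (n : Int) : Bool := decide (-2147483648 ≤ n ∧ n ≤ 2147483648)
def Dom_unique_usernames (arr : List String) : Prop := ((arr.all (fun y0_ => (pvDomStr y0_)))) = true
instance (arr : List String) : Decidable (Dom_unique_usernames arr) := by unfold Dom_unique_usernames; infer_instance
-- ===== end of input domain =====

-- B replaces A's single pass with a running per-name counter by group-by-then-scatter: collect the
-- distinct names, gather each name's occurrence positions, and write that name's whole label sequence
-- into a preallocated output by position; same cost class, no speed claim.

-- ===== PORT A =====
-- A: loop over arr keeping (count dict, result list)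
def uuAStep (st : PySem.Dict String Int × List String) (name : String) :
    PySem.Dict String Int × List String :=
  if st.1.contains name = false then
    (st.1.insert name 0, st.2 ++ ["Verified"])
  else
    -- count[name] += 1; result.append(name + str(count[name]))
    let c := st.1.getD name 0 + 1
    (st.1.insert name c, st.2 ++ [name ++ PySem.Int.toStr c])

def unique_usernames (arr : List String) : List String :=
  (arr.foldl uuAStep (PySem.Dict.empty, [])).2

-- ===== PORT B =====
-- 'for i, name in enumerate(arr): positions.setdefault(name, []).append(i)'
-- (setdefault(name, []).append(i) sets positions[name] to positions.get(name, []) + [i] = Dict.modify)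
def uuGroups (arr : List String) : PySem.Dict String (List Int) :=
  (PySem.List.enumerate arr 0).foldl (fun d q => d.modify q.2 [] (· ++ [q.1])) PySem.Dict.empty

-- 'for k, i in enumerate(idxs): out[i] = "Verified" if k == 0 else name + str(k)'.
-- Python's out starts as [None]*len(arr): modelled as List (Option String); the final extraction
-- (.getD "") in unique_usernames_alt is exact because every cell is written (proved below).
def uuFill (out : List (Option String)) (name : String) (idxs : List Int) : List (Option String) :=
  (PySem.List.enumerate idxs 0).foldl (fun o q =>
    PySem.List.pySetD o q.2 (some (if q.1 = 0 then "Verified" else name ++ PySem.Int.toStr q.1))) out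

def unique_usernames_alt (arr : List String) : List String :=
  let out0 := List.replicate arr.length (none : Option String)
  let out := (uuGroups arr).items.foldl (fun o p => uuFill o p.1 p.2) out0
  out.map (fun o => o.getD "")

-- ===== PRECONDITION & SPEC =====
def Spec_unique_usernames (arr : List String) (out : List String) : Prop := out = unique_usernames_alt arr
instance (arr : List String) (out : List String) : Decidable (Spec_unique_usernames arr out) := by unfold Spec_unique_usernames; infer_instance

-- ===== CLAIM =====
def Claim_equal_unique_usernames : Prop := ∀ (arr : List String), Dom_unique_usernames arr → Spec_unique_usernames arr (unique_usernames arr)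

-- ===== LEMMAS AND PROOFS =====

-- the label both programs produce for position j, as a function of the prefix before j
def labelAt (pre : List String) (name : String) : String :=
  if pre.count name = 0 then "Verified" else name ++ PySem.Int.toStr (pre.count name : Int)

def writeVal (arr : List String) (j : Nat) : String := labelAt (arr.take j) (arr.getD j "")

-- reference form of A: process l with already-seen prefix p
def uuGo (p l : List String) : List String :=
  match l with
  | [] => []
  | name :: rest => labelAt p name :: uuGo (p ++ [name]) rest

def uuInv (d : PySem.Dict String Int) (p : List String) : Prop :=
  ∀ s, d.get? s = if p.count s = 0 then none else some ((p.count s : Int) - 1)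

lemma uuA_eq_go : ∀ (l p : List String) (d : PySem.Dict String Int) (res : List String),
    uuInv d p → (l.foldl uuAStep (d, res)).2 = res ++ uuGo p l := by
  intro l
  induction l with
  | nil => intro p d res _; simp [uuGo]
  | cons name rest ih =>
    intro p d res hinv
    have hcont : d.contains name = (decide (p.count name ≠ 0)) := by
      rw [PySem.Dict.contains_eq_isSome_get?, hinv name]
      by_cases h : p.count name = 0 <;> simp [h]
    by_cases h : p.count name = 0
    · have hstep : uuAStep (d, res) name = (d.insert name 0, res ++ ["Verified"]) := by
        simp [uuAStep, hcont, h]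
      simp only [List.foldl_cons, hstep]
      rw [ih (p ++ [name]) _ _ ?_]
      · simp [uuGo, labelAt, h]
      · intro s
        rw [PySem.Dict.get?_insert]
        rcases eq_or_ne s name with hs | hs
        · simp [hs, List.count_append, h]
        · have hcnt : (p ++ [name]).count s = p.count s := by
            simp [List.count_append, Ne.symm hs]
          rw [hinv s, hcnt]; simp [hs]
    · have hgetD : d.getD name 0 = (p.count name : Int) - 1 := by
        rw [PySem.Dict.getD_eq_get?_getD, hinv name]; simp [h]
      have hstep : uuAStep (d, res) name =
          (d.insert name (p.count name : Int),
           res ++ [name ++ PySem.Int.toStr (p.count name : Int)]) := by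
        simp only [uuAStep, hcont]
        rw [if_neg (by simp [h])]
        simp [hgetD]
      simp only [List.foldl_cons, hstep]
      rw [ih (p ++ [name]) _ _ ?_]
      · simp [uuGo, labelAt, h]
      · intro s
        rw [PySem.Dict.get?_insert]
        rcases eq_or_ne s name with hs | hs
        · have hcnt : (p ++ [name]).count name = p.count name + 1 := by
            simp [List.count_append]
          simp [hs, hcnt, h]
        · have hcnt : (p ++ [name]).count s = p.count s := by
            simp [List.count_append, Ne.symm hs]
          rw [hinv s, hcnt]; simp [hs]

lemma uuGo_length : ∀ (l p : List String), (uuGo p l).length = l.length := by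
  intro l
  induction l with
  | nil => intro p; simp [uuGo]
  | cons name rest ih => intro p; simp [uuGo, ih]

lemma uuGo_get? : ∀ (l p : List String) (j : Nat) (x : String), l[j]? = some x →
    (uuGo p l)[j]? = some (labelAt (p ++ l.take j) x) := by
  intro l
  induction l with
  | nil => intro p j x h; simp at h
  | cons name rest ih =>
    intro p j x h
    cases j with
    | zero => simp at h; simp [uuGo, h]
    | succ j =>
      simp only [List.getElem?_cons_succ] at h
      have := ih (p ++ [name]) j x h
      simpa [uuGo, List.append_assoc] using this

-- occurrence positions of name in l, offset by b (spec of the grouped position lists)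
def idxI (l : List String) (b : Int) (name : String) : List Int :=
  match l with
  | [] => []
  | x :: r => if x = name then b :: idxI r (b + 1) name else idxI r (b + 1) name

lemma filterIdx_eq_idxI : ∀ (l : List String) (b : Int) (name : String),
    ((PySem.List.enumerate l b).filter (fun p => p.2 == name)).map (fun p => p.1) = idxI l b name := by
  intro l
  induction l with
  | nil => intro b name; simp [PySem.List.enumerate_nil, idxI]
  | cons x r ih =>
    intro b name
    rw [PySem.List.enumerate_cons]
    by_cases h : x = name <;> simp [idxI, h, ih (b + 1) name]

lemma groups_getD (arr : List String) (name : String) :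
    (uuGroups arr).getD name [] = idxI arr 0 name := by
  have hswap : uuGroups arr
      = ((PySem.List.enumerate arr 0).map (fun q => (q.2, q.1))).foldl
          (fun d p => d.modify p.1 [] (· ++ [p.2])) PySem.Dict.empty := by
    rw [uuGroups, List.foldl_map]
  rw [hswap, PySem.Dict.getD_foldl_modify_append, PySem.Dict.getD_empty, List.nil_append,
      List.filter_map]
  rw [← filterIdx_eq_idxI arr 0 name, List.map_map]
  rfl

lemma groups_nodup_keys (arr : List String) : (uuGroups arr).keys.Nodup := by
  rw [uuGroups]
  exact PySem.Dict.nodup_keys_foldl_modify_key _ _ _ _ _ PySem.Dict.nodup_keys_empty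

lemma groups_mem_items (arr : List String) (p : String × List Int)
    (hp : p ∈ (uuGroups arr).items) : p.2 = idxI arr 0 p.1 := by
  obtain ⟨k, v⟩ := p
  have h1 : (uuGroups arr).get? k = some v :=
    PySem.Dict.get?_of_mem_items _ hp (groups_nodup_keys arr)
  have h2 : (uuGroups arr).getD k [] = v := by
    rw [PySem.Dict.getD_eq_get?_getD, h1]; rfl
  rw [groups_getD] at h2
  exact h2.symm

lemma idxI_spec : ∀ (l : List String) (b : Int) (name : String) (k : Nat) (i : Int),
    (idxI l b name)[k]? = some i →
    0 ≤ i - b ∧ (l.take (i - b).toNat).count name = k ∧ l[(i - b).toNat]? = some name := by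
  intro l
  induction l with
  | nil => intro b name k i h; simp [idxI] at h
  | cons x r ih =>
    intro b name k i h
    by_cases hx : x = name
    · rw [idxI, if_pos hx] at h
      cases k with
      | zero =>
        simp at h
        subst h
        simp [hx]
      | succ k =>
        simp only [List.getElem?_cons_succ] at h
        obtain ⟨h1, h2, h3⟩ := ih (b + 1) name k i h
        have hm : (i - b).toNat = (i - (b + 1)).toNat + 1 := by omega
        refine ⟨by omega, ?_, ?_⟩
        · rw [hm, List.take_succ_cons, List.count_cons, h2]
          simp [hx]
        · rw [hm, List.getElem?_cons_succ, h3]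
    · rw [idxI, if_neg hx] at h
      obtain ⟨h1, h2, h3⟩ := ih (b + 1) name k i h
      have hm : (i - b).toNat = (i - (b + 1)).toNat + 1 := by omega
      refine ⟨by omega, ?_, ?_⟩
      · rw [hm, List.take_succ_cons, List.count_cons, h2]
        simp [hx]
      · rw [hm, List.getElem?_cons_succ, h3]

lemma idxI_mem : ∀ (l : List String) (b : Int) (j : Nat) (x : String),
    l[j]? = some x → (b + j) ∈ idxI l b x := by
  intro l
  induction l with
  | nil => intro b j x h; simp at h
  | cons y r ih =>
    intro b j x h
    cases j with
    | zero =>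
      simp at h
      simp [idxI, h]
    | succ j =>
      simp only [List.getElem?_cons_succ] at h
      have := ih (b + 1) j x h
      have harith : b + ((j + 1 : Nat) : Int) = (b + 1) + (j : Int) := by push_cast; ring
      rw [harith]
      by_cases hy : y = x <;> simp [idxI, hy, this]

lemma groups_get?_of_mem (arr : List String) (name : String) (h : name ∈ arr) :
    (uuGroups arr).get? name = some (idxI arr 0 name) := by
  obtain ⟨j, hj, hje⟩ := List.getElem_of_mem h
  have hne : idxI arr 0 name ≠ [] := by
    have hm := idxI_mem arr 0 j name (by rw [List.getElem?_eq_getElem hj, hje])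
    intro he
    rw [he] at hm
    simp at hm
  cases hv : (uuGroups arr).get? name with
  | none =>
    have hgd : (uuGroups arr).getD name [] = [] := by
      rw [PySem.Dict.getD_eq_get?_getD, hv]; rfl
    rw [groups_getD] at hgd
    exact absurd hgd hne
  | some v =>
    have hgd : (uuGroups arr).getD name [] = v := by
      rw [PySem.Dict.getD_eq_get?_getD, hv]; rfl
    rw [groups_getD] at hgd
    rw [hgd]

lemma uuFill_fold (arr : List String) (name : String) :
    ∀ (idxs : List Int) (b : Int) (out : List (Option String)),
    (∀ (k : Nat) (i : Int), idxs[k]? = some i → 0 ≤ i ∧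
        (if b + (k : Int) = 0 then "Verified" else name ++ PySem.Int.toStr (b + (k : Int)))
          = writeVal arr i.toNat) →
    (PySem.List.enumerate idxs b).foldl (fun o q =>
        PySem.List.pySetD o q.2 (some (if q.1 = 0 then "Verified" else name ++ PySem.Int.toStr q.1))) out
    = idxs.foldl (fun o i => o.set i.toNat (some (writeVal arr i.toNat))) out := by
  intro idxs
  induction idxs with
  | nil => intro b out _; simp [PySem.List.enumerate_nil]
  | cons i0 rest ih =>
    intro b out h
    have h0 := h 0 i0 (by simp)
    rw [PySem.List.enumerate_cons, List.foldl_cons, List.foldl_cons]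
    dsimp only
    rw [PySem.List.pySetD_of_nonneg _ _ h0.1]
    have hval : (if b = 0 then "Verified" else name ++ PySem.Int.toStr b) = writeVal arr i0.toNat := by
      simpa using h0.2
    rw [hval]
    apply ih (b + 1)
    intro k i hk
    have := h (k + 1) i (by simpa using hk)
    have harith : b + ((k + 1 : Nat) : Int) = b + 1 + (k : Int) := by push_cast; ring
    rw [harith] at this
    exact this

lemma fillOne_eq (arr : List String) (name : String) (out : List (Option String)) :
    uuFill out name (idxI arr 0 name)
    = ((idxI arr 0 name).map Int.toNat).foldl
        (fun o j => o.set j (some (writeVal arr j))) out := by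
  rw [uuFill, List.foldl_map]
  apply uuFill_fold
  intro k i hk
  obtain ⟨hb, hcnt, hidx⟩ := idxI_spec arr 0 name k i hk
  rw [sub_zero] at hb hcnt hidx
  have hd : arr.getD i.toNat "" = name := by
    rw [List.getD_eq_getElem?_getD, hidx]; rfl
  refine ⟨hb, ?_⟩
  rw [writeVal, labelAt, hd, hcnt]
  by_cases hk0 : k = 0
  · simp [hk0]
  · rw [if_neg (by omega), if_neg hk0]
    simp

lemma setFold_length (S : List Nat) (w : Nat → Option String) :
    ∀ (out : List (Option String)),
      (S.foldl (fun o i => o.set i (w i)) out).length = out.length := by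
  induction S with
  | nil => intro out; simp
  | cons x S ih => intro out; rw [List.foldl_cons, ih]; simp

lemma setFold_get? (S : List Nat) (w : Nat → Option String) :
    ∀ (out : List (Option String)) (j : Nat), j < out.length →
      (S.foldl (fun o i => o.set i (w i)) out)[j]?
        = if j ∈ S then some (w j) else out[j]? := by
  induction S with
  | nil => intro out j _; simp
  | cons x S ih =>
    intro out j hj
    rw [List.foldl_cons, ih _ j (by simpa using hj)]
    by_cases hjS : j ∈ S
    · simp [hjS, List.mem_cons]
    · by_cases hjx : j = x
      · subst hjx
        rw [if_neg hjS, List.getElem?_set_self hj]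
        simp
      · rw [if_neg hjS, List.getElem?_set_ne (Ne.symm hjx)]
        simp [hjS, hjx]

lemma outer_fold_eq (arr : List String) (out0 : List (Option String)) :
    (uuGroups arr).items.foldl (fun o p => uuFill o p.1 p.2) out0
    = ((uuGroups arr).items.flatMap (fun p => (idxI arr 0 p.1).map Int.toNat)).foldl
        (fun o j => o.set j (some (writeVal arr j))) out0 := by
  have h1 : (uuGroups arr).items.foldl (fun o p => uuFill o p.1 p.2) out0
      = (uuGroups arr).items.foldl
          (fun o p => ((idxI arr 0 p.1).map Int.toNat).foldl
            (fun o j => o.set j (some (writeVal arr j))) o) out0 := by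
    apply PySem.List.foldl_congr_mem
    intro o p hp
    rw [groups_mem_items arr p hp]
    exact fillOne_eq arr p.1 o
  rw [h1, ← List.foldl_flatMap]

lemma alt_out_get? (arr : List String) (j : Nat) (hj : j < arr.length) :
    ((uuGroups arr).items.foldl (fun o p => uuFill o p.1 p.2)
        (List.replicate arr.length (none : Option String)))[j]?
      = some (some (writeVal arr j)) := by
  rw [outer_fold_eq, setFold_get? _ _ _ j (by simpa using hj)]
  rw [if_pos ?_]
  have hget : arr[j]? = some arr[j] := List.getElem?_eq_getElem hj
  have hpair : (arr[j], idxI arr 0 arr[j]) ∈ (uuGroups arr).items :=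
    PySem.Dict.mem_items_of_get?_eq_some _ (groups_get?_of_mem arr arr[j] (List.getElem_mem hj))
  refine List.mem_flatMap.mpr ⟨(arr[j], idxI arr 0 arr[j]), hpair, ?_⟩
  refine List.mem_map.mpr ⟨(j : Int), ?_, by simp⟩
  have := idxI_mem arr 0 j arr[j] hget
  simpa using this

lemma alt_out_length (arr : List String) :
    ((uuGroups arr).items.foldl (fun o p => uuFill o p.1 p.2)
        (List.replicate arr.length (none : Option String))).length = arr.length := by
  rw [outer_fold_eq, setFold_length]
  simp

-- ===== VERDICT =====
theorem unique_usernames_spec : Claim_equal_unique_usernames := by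
  intro arr _
  show unique_usernames arr = unique_usernames_alt arr
  have hA : unique_usernames arr = uuGo [] arr := by
    have := uuA_eq_go arr [] PySem.Dict.empty [] (by intro s; simp [PySem.Dict.get?_empty])
    simpa [unique_usernames] using this
  apply List.ext_getElem?
  intro j
  by_cases hj : j < arr.length
  · have hget : arr[j]? = some (arr.getD j "") := by
      rw [List.getD_eq_getElem?_getD, List.getElem?_eq_getElem hj]; rfl
    have hAj : (unique_usernames arr)[j]? = some (writeVal arr j) := by
      rw [hA, uuGo_get? arr [] j _ hget]
      simp [writeVal]
    have hBj : (unique_usernames_alt arr)[j]? = some (writeVal arr j) := by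
      rw [unique_usernames_alt]
      simp only [List.getElem?_map, alt_out_get? arr j hj]
      rfl
    rw [hAj, hBj]
  · have hlA : (unique_usernames arr).length = arr.length := by rw [hA, uuGo_length]
    have hlB : (unique_usernames_alt arr).length = arr.length := by
      rw [unique_usernames_alt]
      simp [alt_out_length arr]
    rw [List.getElem?_eq_none_iff.mpr (by omega), List.getElem?_eq_none_iff.mpr (by omega)]
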